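-- pv_equiv track=rewrite | github.com/daniel-reich/ubiquitous-fiesta | 2Tr4gAzWimWvGpJW7_8.py | is_there_consecutive
-- ===== SOURCE A (Python) =====
-- def is_there_consecutive(lst, n, times):
--     if times == 0:
--         return n not in lst
--     elif times == 1:
--         return n in lst
--     else:
--         target = [n] * times
--         return any([lst[k:k+times] == target for k in range(len(lst) - times)])
-- ===== SOURCE B (Python) =====
-- def is_there_consecutive(lst, n, times):
--     if times == 0:
--         return n not in lst
--     if times == 1:
--         return n in lst
--     run = 0
--     for x in lst:
--         run = run + 1 if x == n else 0
--         if run >= times: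
--             return True
--     return False
-- ===== Notes on version B (the rewrite author's own statement) =====
-- stated objective: faster
-- what changed: replaced the build-all-windows-and-compare scan (every slice lst[k:k+times] compared to [n]*times) by a single run-counting pass over the list; Pre_ excludes only the empty list with negative times, where A's True comes from an accidental empty-slice comparison and B's loop naturally returns False
-- intended difference: for times >= 2, when the only run of times consecutive n's ends exactly at the last element, A returns False because range(len(lst) - times) never checks the final window, while B returns True, which is the intended answer to 'are there times consecutive n's in lst' — e.g. on is_there_consecutive([1, 1], 1, 2): A returns false, B returns true
-- outside the precondition, e.g. on is_there_consecutive([], 5, -1): A returns True, B returns False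
import Mathlib
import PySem

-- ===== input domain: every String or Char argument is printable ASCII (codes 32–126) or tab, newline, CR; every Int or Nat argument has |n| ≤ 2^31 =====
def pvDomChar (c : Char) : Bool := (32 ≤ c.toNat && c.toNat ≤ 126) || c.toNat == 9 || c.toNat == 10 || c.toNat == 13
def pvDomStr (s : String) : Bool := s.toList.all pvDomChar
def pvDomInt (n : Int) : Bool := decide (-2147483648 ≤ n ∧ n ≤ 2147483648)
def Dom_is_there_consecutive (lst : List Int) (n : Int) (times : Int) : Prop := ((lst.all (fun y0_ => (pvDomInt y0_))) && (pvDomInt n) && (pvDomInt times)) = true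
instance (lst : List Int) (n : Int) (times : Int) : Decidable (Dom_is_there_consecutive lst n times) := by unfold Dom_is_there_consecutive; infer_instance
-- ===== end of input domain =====

-- B replaces A's build-all-windows-and-compare scan by a single run-counting pass (measured faster at large sizes; A misses a run ending at the last element — stated as D_ below).


-- ===== PORT A =====
def is_there_consecutive (lst : List Int) (n : Int) (times : Int) : Bool :=
  if times == 0 then !(lst.contains n)
  else if times == 1 then lst.contains n
  else
    let target := List.replicate times.toNat n
    ((PySem.List.pyRange 0 ((lst.length : Int) - times) 1).map
      (fun k => PySem.List.slice lst (some k) (some (k + times)) == target)).any id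

-- ===== PORT B =====
-- the scan of Source B: run counter over the list, early return when the counter reaches times
def runScan (n times : Int) : List Int → Int → Bool
  | [], _ => false
  | x :: xs, run =>
    let run' := if x == n then run + 1 else 0
    if times ≤ run' then true else runScan n times xs run'

def is_there_consecutive_alt (lst : List Int) (n : Int) (times : Int) : Bool :=
  if times == 0 then !(lst.contains n)
  else if times == 1 then lst.contains n
  else runScan n times lst 0

-- ===== PRECONDITION & SPEC =====
-- Pre_ excludes the empty list with a negative repetition count: there A's True is an accident
-- of comparing an empty slice to the empty target [n]*times, while B's loop never runs and
-- naturally returns False; either value is as defensible as the other on that degenerate input.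
def Pre_is_there_consecutive (lst : List Int) (n : Int) (times : Int) : Prop := 0 ≤ times ∨ lst ≠ []
instance (lst : List Int) (n : Int) (times : Int) : Decidable (Pre_is_there_consecutive lst n times) := by unfold Pre_is_there_consecutive; infer_instance

def pvWitness_is_there_consecutive : List Int × Int × Int := ([1, 1, 2], 1, 2)

-- for times ≥ 2, when the only run of times consecutive n's ends exactly at the last element of
-- lst, A returns False (range(len(lst) - times) never checks the final window) while B returns
-- True, which is the intended answer to "are there times consecutive occurrences of n in lst".
def D_is_there_consecutive (lst : List Int) (n : Int) (times : Int) : Prop :=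
  (decide (2 ≤ times) && decide (times ≤ (lst.length : Int)) &&
   decide (List.replicate times.toNat n <:+: lst) &&
   !decide (List.replicate times.toNat n <:+: lst.dropLast)) = true
instance (lst : List Int) (n : Int) (times : Int) : Decidable (D_is_there_consecutive lst n times) := by unfold D_is_there_consecutive; infer_instance

def Spec_is_there_consecutive (lst : List Int) (n : Int) (times : Int) (out : Bool) : Prop := ¬ D_is_there_consecutive lst n times → out = is_there_consecutive_alt lst n times
instance (lst : List Int) (n : Int) (times : Int) (out : Bool) : Decidable (Spec_is_there_consecutive lst n times out) := by unfold Spec_is_there_consecutive; infer_instance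

def pvDiffWitness_is_there_consecutive : List Int × Int × Int := ([1, 1], 1, 2)
def pvDiffWitnessOut_is_there_consecutive : Bool × Bool := (false, true)

-- ===== CLAIM (what is proved, stated in full; the proofs are below) =====
def Claim_unchanged_is_there_consecutive : Prop := ∀ (lst : List Int) (n : Int) (times : Int), Dom_is_there_consecutive lst n times → Pre_is_there_consecutive lst n times → Spec_is_there_consecutive lst n times (is_there_consecutive lst n times)
def Claim_changed_is_there_consecutive : Prop := Dom_is_there_consecutive (pvDiffWitness_is_there_consecutive.1) (pvDiffWitness_is_there_consecutive.2.1) (pvDiffWitness_is_there_consecutive.2.2) ∧ Pre_is_there_consecutive (pvDiffWitness_is_there_consecutive.1) (pvDiffWitness_is_there_consecutive.2.1) (pvDiffWitness_is_there_consecutive.2.2) ∧ D_is_there_consecutive (pvDiffWitness_is_there_consecutive.1) (pvDiffWitness_is_there_consecutive.2.1) (pvDiffWitness_is_there_consecutive.2.2) ∧ is_there_consecutive (pvDiffWitness_is_there_consecutive.1) (pvDiffWitness_is_there_consecutive.2.1) (pvDiffWitness_is_there_consecutive.2.2) = pvDiffWitnessOut_is_there_consecutive.1 ∧ is_there_consecutive_alt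 (pvDiffWitness_is_there_consecutive.1) (pvDiffWitness_is_there_consecutive.2.1) (pvDiffWitness_is_there_consecutive.2.2) = pvDiffWitnessOut_is_there_consecutive.2 ∧ pvDiffWitnessOut_is_there_consecutive.1 ≠ pvDiffWitnessOut_is_there_consecutive.2
def Claim_exact_is_there_consecutive : Prop := ∀ (lst : List Int) (n : Int) (times : Int), Dom_is_there_consecutive lst n times → Pre_is_there_consecutive lst n times → D_is_there_consecutive lst n times → is_there_consecutive lst n times ≠ is_there_consecutive_alt lst n times

-- ===== LEMMAS AND PROOFS =====

-- a take-of-drop window is an infix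
lemma take_drop_infix (l : List Int) (k m : Nat) : (l.drop k).take m <:+: l :=
  ((l.drop k).take_prefix m).isInfix.trans (l.drop_suffix k).isInfix

-- an all-n run of length tn > run cannot cross an element x ≠ n
lemma infix_replicate_append_cons {n x : Int} {tn : Nat} (hx : x ≠ n) (ht : 1 ≤ tn)
    (xs : List Int) :
    ∀ run : Nat, run < tn →
    ((List.replicate tn n <:+: List.replicate run n ++ x :: xs) ↔
      List.replicate tn n <:+: xs) := by
  intro run
  induction run with
  | zero =>
    intro _
    simp only [List.replicate_zero, List.nil_append, List.infix_cons_iff]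
    constructor
    · rintro (hp | h)
      · exfalso
        obtain ⟨tm, rfl⟩ : ∃ tm, tn = tm + 1 := ⟨tn - 1, by omega⟩
        rw [List.replicate_succ, List.cons_prefix_cons] at hp
        exact hx hp.1.symm
      · exact h
    · exact Or.inr
  | succ run ih =>
    intro hrun
    rw [List.replicate_succ, List.cons_append, List.infix_cons_iff]
    constructor
    · rintro (hp | h)
      · exfalso
        have hi : run + 1 < (List.replicate tn n).length := by simp; omega
        have hge := hp.getElem hi
        rw [List.getElem_replicate] at hge
        rw [List.getElem_cons_succ, List.getElem_append_right (by simp)] at hge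
        simp at hge
        exact hx hge.symm
      · exact (ih (by omega)).mp h
    · intro h
      exact Or.inr ((ih (by omega)).mpr h)

-- invariant of the counting scan: run = number of n's seen immediately before the head
lemma runScan_iff (n : Int) (tn : Nat) (xs : List Int) :
    ∀ run : Nat, 1 ≤ tn → run < tn →
    (runScan n (tn : Int) xs (run : Int) = true ↔
      List.replicate tn n <:+: List.replicate run n ++ xs) := by
  induction xs with
  | nil =>
    intro run ht hrun
    simp only [runScan, List.append_nil, Bool.false_eq_true, false_iff]
    intro h
    have := h.length_le
    simp at this
    omega
  | cons x xs ih =>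
    intro run ht hrun
    simp only [runScan]
    by_cases hx : x = n
    · simp only [hx, beq_self_eq_true, if_true]
      by_cases hle : (tn : Int) ≤ (run : Int) + 1
      · rw [if_pos hle]
        have htn : tn = run + 1 := by omega
        have heq : List.replicate run n ++ n :: xs = List.replicate tn n ++ xs := by
          rw [htn, List.replicate_succ']; simp
        rw [heq]
        exact iff_of_true rfl ((List.replicate tn n).prefix_append xs).isInfix
      · rw [if_neg hle]
        have h1 : ((run : Int) + 1) = ((run + 1 : Nat) : Int) := by push_cast; ring
        rw [h1, ih (run + 1) ht (by omega)]
        have heq : List.replicate run n ++ n :: xs = List.replicate (run + 1) n ++ xs := by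
          rw [List.replicate_succ']; simp
        rw [heq]
    · have hbe : (x == n) = false := by simp [hx]
      simp only [hbe, Bool.false_eq_true, if_false]
      rw [if_neg (by omega : ¬ (tn : Int) ≤ 0)]
      rw [(by simp : (0 : Int) = ((0 : Nat) : Int)), ih 0 ht (by omega)]
      rw [List.replicate_zero, List.nil_append]
      exact (infix_replicate_append_cons hx ht xs run hrun).symm

-- A's window scan finds exactly an all-n infix of lst.dropLast of length tn
lemma windows_iff (lst : List Int) (n : Int) (tn : Nat) (ht : 1 ≤ tn) :
    (∃ kn : Nat, kn + tn < lst.length ∧ (lst.drop kn).take tn = List.replicate tn n) ↔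
      List.replicate tn n <:+: lst.dropLast := by
  rw [List.dropLast_eq_take]
  constructor
  · rintro ⟨kn, hlt, heq⟩
    have h1 : ((lst.take (lst.length - 1)).drop kn).take tn = (lst.drop kn).take tn := by
      rw [List.drop_take, List.take_take, min_eq_left (by omega)]
    rw [← heq, ← h1]
    exact take_drop_infix _ kn tn
  · rintro ⟨s, u, hsu⟩
    have hlen := congrArg List.length hsu
    simp only [List.length_append, List.length_replicate, List.length_take] at hlen
    rw [Nat.min_eq_left (by omega)] at hlen
    refine ⟨s.length, by omega, ?_⟩
    have h1 : ((lst.take (lst.length - 1)).drop s.length).take tn =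
        (lst.drop s.length).take tn := by
      rw [List.drop_take, List.take_take, min_eq_left (by omega)]
    rw [← h1, ← hsu, List.append_assoc, List.drop_left,
      List.take_left' (List.length_replicate ..)]

-- D_ unpacked to its propositional content (the times ≤ len guard is implied by the infix)
lemma D_iff (lst : List Int) (n times : Int) :
    D_is_there_consecutive lst n times ↔
      2 ≤ times ∧ (List.replicate times.toNat n <:+: lst) ∧
        ¬ (List.replicate times.toNat n <:+: lst.dropLast) := by
  unfold D_is_there_consecutive
  simp only [Bool.and_eq_true, Bool.not_eq_true', decide_eq_true_eq, decide_eq_false_iff_not]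
  constructor
  · rintro ⟨⟨⟨h2, _⟩, hi⟩, hni⟩
    exact ⟨h2, hi, hni⟩
  · rintro ⟨h2, hi, hni⟩
    have hlen := hi.length_le
    simp only [List.length_replicate] at hlen
    exact ⟨⟨⟨h2, by omega⟩, hi⟩, hni⟩

-- characterisation of port A for times ≥ 2
lemma A_iff (lst : List Int) (n times : Int) (h2 : 2 ≤ times) :
    (is_there_consecutive lst n times = true ↔
      List.replicate times.toNat n <:+: lst.dropLast) := by
  have h0 : ¬ (times == 0) = true := by simp; omega
  have h1 : ¬ (times == 1) = true := by simp; omega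
  unfold is_there_consecutive
  rw [if_neg h0, if_neg h1]
  have hts : times = (times.toNat : Int) := (Int.toNat_of_nonneg (by omega)).symm
  set tn := times.toNat with htn
  rw [← windows_iff lst n tn (by omega)]
  simp only [List.any_map, List.any_eq_true, PySem.List.mem_pyRange_one,
    Function.comp, id, beq_iff_eq]
  constructor
  · rintro ⟨k, ⟨hk0, hklt⟩, heq⟩
    lift k to ℕ using hk0
    rw [hts, PySem.List.slice_natCast_add] at heq
    exact ⟨k, by omega, heq⟩
  · rintro ⟨kn, hlt, heq⟩
    refine ⟨(kn : Int), ⟨by positivity, by omega⟩, ?_⟩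
    rw [hts, PySem.List.slice_natCast_add]
    exact heq

-- characterisation of port B for times ≥ 2
lemma B_iff (lst : List Int) (n times : Int) (h2 : 2 ≤ times) :
    (is_there_consecutive_alt lst n times = true ↔
      List.replicate times.toNat n <:+: lst) := by
  have h0 : ¬ (times == 0) = true := by simp; omega
  have h1 : ¬ (times == 1) = true := by simp; omega
  unfold is_there_consecutive_alt
  rw [if_neg h0, if_neg h1]
  have hts : times = (times.toNat : Int) := (Int.toNat_of_nonneg (by omega)).symm
  rw [hts, (by simp : (0 : Int) = ((0 : Nat) : Int)),
    runScan_iff n times.toNat lst 0 (by omega) (by omega)]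
  simp
  rw [show (max times 0).toNat = times.toNat by omega]

-- an out-of-range window with negative extent is the empty slice
lemma slice_neg_len (lst : List Int) (times : Int) :
    PySem.List.slice lst (some (lst.length : Int)) (some ((lst.length : Int) + times)) = [] := by
  apply List.eq_nil_of_length_eq_zero
  rw [PySem.List.length_slice]
  have h1 := PySem.List.clampIdx_le lst.length ((lst.length : Int) + times)
  have h2 : PySem.List.clampIdx lst.length (lst.length : Int) = lst.length := by simp
  omega

-- for negative times both ports return True on a nonempty list
lemma neg_case (lst : List Int) (n times : Int) (hneg : times < 0) (hne : lst ≠ []) :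
    is_there_consecutive lst n times = true ∧ is_there_consecutive_alt lst n times = true := by
  have h0 : ¬ (times == 0) = true := by simp; omega
  have h1 : ¬ (times == 1) = true := by simp; omega
  have htn : times.toNat = 0 := Int.toNat_eq_zero.mpr (le_of_lt hneg)
  have hlen : 1 ≤ lst.length := List.length_pos_iff.mpr hne
  constructor
  · unfold is_there_consecutive
    rw [if_neg h0, if_neg h1]
    simp only [htn, List.replicate_zero, List.any_map, List.any_eq_true,
      PySem.List.mem_pyRange_one, Function.comp, id, beq_iff_eq]
    refine ⟨(lst.length : Int), ⟨by positivity, by omega⟩, slice_neg_len lst times⟩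
  · unfold is_there_consecutive_alt
    rw [if_neg h0, if_neg h1]
    obtain ⟨x, xs, rfl⟩ := List.exists_cons_of_ne_nil hne
    simp only [runScan]
    rw [if_pos]
    split <;> omega

-- ===== VERDICT (by name: the statements are the Claim_ definitions above) =====
theorem is_there_consecutive_spec : Claim_unchanged_is_there_consecutive := by
  intro lst n times _ hpre
  unfold Spec_is_there_consecutive
  intro hnd
  by_cases h2 : 2 ≤ times
  · rw [Bool.eq_iff_iff, A_iff lst n times h2, B_iff lst n times h2]
    constructor
    · intro h
      exact h.trans (List.dropLast_prefix lst).isInfix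
    · intro h
      by_contra hno
      exact hnd ((D_iff lst n times).mpr ⟨h2, h, hno⟩)
  · by_cases h0 : times = 0
    · unfold is_there_consecutive is_there_consecutive_alt
      simp [h0]
    · by_cases h1 : times = 1
      · unfold is_there_consecutive is_there_consecutive_alt
        simp [h1]
      · have hneg : times < 0 := by omega
        have hne : lst ≠ [] := by
          rcases hpre with h | h
          · omega
          · exact h
        obtain ⟨ha, hb⟩ := neg_case lst n times hneg hne
        rw [ha, hb]

theorem is_there_consecutive_changed : Claim_changed_is_there_consecutive := by
  unfold Claim_changed_is_there_consecutive; decide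

theorem is_there_consecutive_tight : Claim_exact_is_there_consecutive := by
  intro lst n times _ _ hd
  obtain ⟨h2, hinf, hninf⟩ := (D_iff lst n times).mp hd
  have ha : is_there_consecutive lst n times = false := by
    rw [← Bool.not_eq_true, A_iff lst n times h2]; exact hninf
  have hb : is_there_consecutive_alt lst n times = true := by
    rw [B_iff lst n times h2]; exact hinf
  rw [ha, hb]; simp
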